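-- pv_equiv track=rewrite | github.com/ViktorEl/subory | diktat_ucitel.py | vytvor_diktat_ziak
-- ===== SOURCE A (Python) =====
-- def vytvor_diktat_ziak(text, nahradit):
--     novy_text = ''
--     for pismeno in text:
--         if pismeno in nahradit:
--             novy_text = novy_text + '_'
--         else:
--             novy_text = novy_text + pismeno
--     return novy_text
-- ===== SOURCE B (Python) =====
-- def vytvor_diktat_ziak(text, nahradit):
--     for c in nahradit:
--         text = text.replace(c, '_')
--     return text
-- ===== Notes on version B (the rewrite author's own statement) =====
-- stated objective: idiomatic
-- what changed: Inverts the traversal: instead of one pass over text testing each character for membership in nahradit, B makes one whole-text str.replace pass per character of nahradit (order-independent because the replacement '_' is itself a fixed point of every later pass).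
import Mathlib
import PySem

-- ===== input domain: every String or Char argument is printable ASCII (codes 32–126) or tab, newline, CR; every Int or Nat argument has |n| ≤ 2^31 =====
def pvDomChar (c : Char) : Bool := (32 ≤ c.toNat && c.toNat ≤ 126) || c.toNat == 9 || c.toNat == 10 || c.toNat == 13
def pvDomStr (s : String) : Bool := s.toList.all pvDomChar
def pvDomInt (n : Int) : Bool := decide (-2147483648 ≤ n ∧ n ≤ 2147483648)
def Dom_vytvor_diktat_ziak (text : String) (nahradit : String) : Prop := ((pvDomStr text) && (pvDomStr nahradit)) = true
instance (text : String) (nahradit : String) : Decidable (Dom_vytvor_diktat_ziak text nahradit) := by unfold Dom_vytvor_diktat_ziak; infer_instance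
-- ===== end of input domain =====

-- B inverts the traversal: one whole-text str.replace pass per character of nahradit, instead of
-- A's single pass over text with a membership test per character (idiomatic staged-pass decomposition).

-- ===== PORT A =====
-- A: loop over text, append '_' if the character occurs in nahradit, else the character itself.
-- ('pismeno in nahradit' with pismeno a single character is exactly char membership.)
def vytvor_diktat_ziak (text : String) (nahradit : String) : String :=
  String.ofList (text.toList.foldl
    (fun novy_text pismeno =>
      if nahradit.toList.contains pismeno then novy_text ++ ['_']
      else novy_text ++ [pismeno]) [])

-- ===== PORT B =====
-- B: for each character c of nahradit, rewrite the whole text with text.replace(c, '_').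
def vytvor_diktat_ziak_alt (text : String) (nahradit : String) : String :=
  nahradit.toList.foldl (fun t c => PySem.Str.replace t (String.ofList [c]) "_") text

-- ===== PRECONDITION & SPEC =====
def Spec_vytvor_diktat_ziak (text : String) (nahradit : String) (out : String) : Prop := out = vytvor_diktat_ziak_alt text nahradit
instance (text : String) (nahradit : String) (out : String) : Decidable (Spec_vytvor_diktat_ziak text nahradit out) := by unfold Spec_vytvor_diktat_ziak; infer_instance

-- ===== CLAIM (what is proved, stated in full; the proofs are below) =====
def Claim_equal_vytvor_diktat_ziak : Prop := ∀ (text : String) (nahradit : String), Dom_vytvor_diktat_ziak text nahradit → Spec_vytvor_diktat_ziak text nahradit (vytvor_diktat_ziak text nahradit)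

-- ===== LEMMAS AND PROOFS =====

-- replace.go with a single-char pattern is a pointwise substitution
theorem go_single (c : Char) (l : List Char) (fuel : Nat) (acc : List Char)
    (h : l.length ≤ fuel) :
    PySem.Chars.replace.go [c] ['_'] fuel l acc
      = acc.reverse ++ l.map (fun x => if x = c then '_' else x) := by
  induction l generalizing fuel acc with
  | nil => cases fuel <;> simp [PySem.Chars.replace.go]
  | cons x t ih =>
      cases fuel with
      | zero => simp at h
      | succ f =>
          by_cases hx : x = c
          · subst hx
            have hstep : PySem.Chars.replace.go [x] ['_'] (f+1) (x :: t) acc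
                = PySem.Chars.replace.go [x] ['_'] f t ('_' :: acc) := by
              simp [PySem.Chars.replace.go, List.isPrefixOf]
            rw [hstep, ih f _ (by simpa using h)]
            simp
          · have hstep : PySem.Chars.replace.go [c] ['_'] (f+1) (x :: t) acc
                = PySem.Chars.replace.go [c] ['_'] f t (x :: acc) := by
              simp [PySem.Chars.replace.go, List.isPrefixOf, Ne.symm hx]
            rw [hstep, ih f _ (by simpa using h)]
            simp [hx]

-- replacing a single character by '_' is a pointwise map
theorem charsReplace_single (c : Char) (l : List Char) :
    PySem.Chars.replace l [c] ['_'] = l.map (fun x => if x = c then '_' else x) := by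
  rw [PySem.Chars.replace]
  simp only [List.isEmpty_cons, Bool.false_eq_true, if_neg, ite_false]
  simpa using go_single c l l.length [] le_rfl

-- staged single-char replacements compose into one membership-driven substitution
theorem fold_replace (nah l : List Char) :
    nah.foldl (fun t c => PySem.Chars.replace t [c] ['_']) l
      = l.map (fun x => if nah.contains x then '_' else x) := by
  induction nah generalizing l with
  | nil => simp
  | cons c cs ih =>
      rw [List.foldl_cons, charsReplace_single, ih, List.map_map]
      apply List.map_congr_left
      intro x _
      by_cases hx : x = c
      · subst hx; simp
      · simp [Function.comp, hx]

-- the string-level fold of B computes the list-level fold on toList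
theorem fold_replace_str (nah : List Char) (text : String) :
    (nah.foldl (fun t c => PySem.Str.replace t (String.ofList [c]) "_") text).toList
      = nah.foldl (fun l c => PySem.Chars.replace l [c] ['_']) text.toList := by
  induction nah generalizing text with
  | nil => rfl
  | cons c cs ih =>
      rw [List.foldl_cons, List.foldl_cons, ih]
      congr 1
      simp [PySem.Str.replace]

-- A's accumulator loop builds the map of the substitution function
theorem loop_eq_map (nah : String) (l acc : List Char) :
    (l.foldl (fun novy_text pismeno =>
      if nah.toList.contains pismeno then novy_text ++ ['_']
      else novy_text ++ [pismeno]) acc)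
    = acc ++ l.map (fun c => if nah.toList.contains c then '_' else c) := by
  induction l generalizing acc with
  | nil => simp
  | cons x xs ih =>
      simp only [List.foldl_cons, ih]
      by_cases hx : x ∈ nah.toList <;> simp [hx]

-- ===== VERDICT (by name: the statement is the Claim_ definition above) =====
theorem vytvor_diktat_ziak_spec : Claim_equal_vytvor_diktat_ziak := by
  intro text nahradit _
  unfold Spec_vytvor_diktat_ziak vytvor_diktat_ziak vytvor_diktat_ziak_alt
  have hB := fold_replace_str nahradit.toList text
  rw [fold_replace] at hB
  rw [loop_eq_map]
  apply String.toList_injective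
  simp [hB]
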